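-- pv_equiv track=rewrite | github.com/Hamed-de0/secura-app | backend/app/services/compliance/requirement_overview.py | _breadcrumbs_from_code
-- ===== SOURCE A (Python) =====
-- from typing import Iterable, List, Optional, Sequence, Dict, Set, Tuple
--
-- def _breadcrumbs_from_code(code: str) -> List[str]:
--     if not code:
--         return []
--     parts = code.split(".")
--     crumbs = []
--     for i in range(1, len(parts) + 1):
--         crumbs.append(".".join(parts[:i]))
--     return crumbs
-- ===== SOURCE B (Python) =====
-- from typing import List
--
--
-- def _breadcrumbs_from_code(code: str) -> List[str]:
--     if not code:
--         return []
--     first, *rest = code.split(".")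
--     crumbs = [first]
--     prefix = first
--     for part in rest:
--         prefix = prefix + "." + part
--         crumbs.append(prefix)
--     return crumbs
-- ===== Notes on version B (the rewrite author's own statement) =====
-- stated objective: simpler
-- what changed: Replaces the index-range loop that re-slices the parts list and re-joins '.'.join(parts[:i]) at every step with a single pass over the parts that maintains one running prefix string and appends it to the result.
import Mathlib
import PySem

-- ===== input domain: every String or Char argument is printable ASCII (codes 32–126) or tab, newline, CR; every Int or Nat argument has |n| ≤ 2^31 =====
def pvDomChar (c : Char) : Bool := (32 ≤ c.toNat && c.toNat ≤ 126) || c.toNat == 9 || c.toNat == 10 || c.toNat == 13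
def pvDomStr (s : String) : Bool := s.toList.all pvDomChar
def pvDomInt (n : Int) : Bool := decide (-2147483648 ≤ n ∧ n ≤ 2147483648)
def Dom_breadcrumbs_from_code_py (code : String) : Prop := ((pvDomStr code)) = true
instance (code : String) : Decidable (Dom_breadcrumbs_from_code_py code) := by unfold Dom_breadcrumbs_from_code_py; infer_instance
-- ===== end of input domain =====

-- B replaces the slice-and-rejoin index loop with a single pass maintaining an incremental prefix string (objective: simpler).


-- ===== PORT A =====
def breadcrumbs_from_code_py (code : String) : List String :=
  if code = "" then []
  else
    -- parts = code.split with a one-character separator, which is nonempty, so split? is always `some`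
    let parts := (PySem.Str.split? code ".").getD []
    (PySem.List.pyRange 1 ((parts.length : Int) + 1)).foldl
      (fun crumbs i => crumbs ++ [PySem.Str.join "." (PySem.List.slice parts none (some i))]) []

-- ===== PORT B =====
-- the `for part in rest` loop of Source B: state = (prefix, crumbs)
def bcCrumbsLoop (pref : String) (crumbs : List String) : List String → List String
  | [] => crumbs
  | part :: rest => bcCrumbsLoop (pref ++ "." ++ part) (crumbs ++ [pref ++ "." ++ part]) rest

def breadcrumbs_from_code_py_alt (code : String) : List String :=
  if code = "" then []
  else
    match (PySem.Str.split? code ".").getD [] with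
    | [] => []  -- unreachable: split with a nonempty separator never yields an empty list
    | first :: rest => bcCrumbsLoop first [first] rest

-- ===== PRECONDITION & SPEC =====
def Spec_breadcrumbs_from_code_py (code : String) (out : List String) : Prop := out = breadcrumbs_from_code_py_alt code
instance (code : String) (out : List String) : Decidable (Spec_breadcrumbs_from_code_py code out) := by unfold Spec_breadcrumbs_from_code_py; infer_instance

-- ===== CLAIM (what is proved, stated in full; the proofs are below) =====
def Claim_equal_breadcrumbs_from_code_py : Prop := ∀ (code : String), Dom_breadcrumbs_from_code_py code → Spec_breadcrumbs_from_code_py code (breadcrumbs_from_code_py code)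

-- ===== LEMMAS AND PROOFS =====

theorem chars_join_snoc (sep : List Char) (xs : List (List Char)) (y : List Char) (h : xs ≠ []) :
    PySem.Chars.join sep (xs ++ [y]) = PySem.Chars.join sep xs ++ sep ++ y := by
  induction xs with
  | nil => simp at h
  | cons a tl ih =>
    cases tl with
    | nil => simp [PySem.Chars.join, List.intercalate]
    | cons b tl2 =>
      have ih' := ih (by simp)
      simp only [PySem.Chars.join, List.intercalate] at *
      simp [List.intersperse] at *
      simp [ih']

theorem str_join_snoc (xs : List String) (y : String) (h : xs ≠ []) :
    PySem.Str.join "." (xs ++ [y]) = PySem.Str.join "." xs ++ "." ++ y := by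
  have : (PySem.Str.join "." (xs ++ [y])).toList = (PySem.Str.join "." xs ++ "." ++ y).toList := by
    simp only [String.toList_append, PySem.Str.join, String.toList_ofList]
    rw [List.map_append, List.map_cons, List.map_nil, chars_join_snoc _ _ _ (by simpa using h)]
  exact String.toList_inj.mp this

theorem str_join_singleton (a : String) : PySem.Str.join "." [a] = a := by
  simp [PySem.Str.join, PySem.Chars.join, List.intercalate]

-- range(1, n+1) as a list of Int
theorem pyRange_one_succ (n : Nat) :
    PySem.List.pyRange 1 ((n : Int) + 1) = List.map (fun k : Nat => ((k : Int) + 1)) (List.range n) := by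
  induction n with
  | zero => rfl
  | succ m ih =>
    rw [show ((m + 1 : Nat) : Int) + 1 = ((m : Int) + 1) + 1 by push_cast; ring,
        PySem.List.pyRange_one_succ_right (by omega), ih, List.range_succ]
    simp

-- A's loop in closed form: the k-th crumb is the join of the first k+1 parts
theorem foldA (parts : List String) :
    (PySem.List.pyRange 1 ((parts.length : Int) + 1)).foldl
      (fun crumbs i => crumbs ++ [PySem.Str.join "." (PySem.List.slice parts none (some i))]) []
    = (List.range parts.length).map (fun k => PySem.Str.join "." (parts.take (k + 1))) := by
  rw [PySem.List.foldl_append_singleton_eq_map, pyRange_one_succ, List.map_map, List.nil_append]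
  apply List.map_congr_left
  intro k _
  simp only [Function.comp]
  rw [PySem.List.slice_to parts (b := (k:Int)+1) (by positivity),
      show ((k:Int) + 1).toNat = k + 1 by omega]

theorem mapTake (first : String) (rest : List String) (f : List String → String) :
    (List.range (rest.length + 1)).map (fun k => f ((first :: rest).take (k + 1)))
    = f [first] :: (List.range rest.length).map (fun k => f (first :: rest.take (k + 1))) := by
  rw [List.range_succ_eq_map, List.map_cons, List.map_map]
  simp [Function.comp, List.take_succ_cons]

-- B's loop computes the remaining prefix joins, with the prefix carried as a joined list
theorem bcCrumbsLoop_eq (rest : List String) : ∀ (acc crumbs : List String), acc ≠ [] →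
    bcCrumbsLoop (PySem.Str.join "." acc) crumbs rest
      = crumbs ++ (List.range rest.length).map
          (fun k => PySem.Str.join "." (acc ++ rest.take (k + 1))) := by
  induction rest with
  | nil => intro acc crumbs _; simp [bcCrumbsLoop]
  | cons p rs ih =>
    intro acc crumbs hacc
    have hsnoc := str_join_snoc acc p hacc
    have := ih (acc ++ [p]) (crumbs ++ [PySem.Str.join "." acc ++ "." ++ p]) (by simp)
    rw [hsnoc] at this
    simp only [bcCrumbsLoop, this, List.length_cons, List.range_succ_eq_map]
    simp [List.append_assoc, Function.comp]
    exact hsnoc.symm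

-- ===== VERDICT (by name: the statement is the Claim_ definition above) =====
theorem breadcrumbs_from_code_py_spec : Claim_equal_breadcrumbs_from_code_py := by
  intro code _
  unfold Spec_breadcrumbs_from_code_py breadcrumbs_from_code_py breadcrumbs_from_code_py_alt
  by_cases h : code = ""
  · simp [h]
  · rw [if_neg h, if_neg h]
    cases hp : (PySem.Str.split? code ".").getD [] with
    | nil => simp [PySem.List.pyRange]
    | cons first rest =>
      show _ = bcCrumbsLoop first [first] rest
      rw [foldA]
      have hB := bcCrumbsLoop_eq rest [first] [first] (by simp)
      rw [str_join_singleton] at hB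
      rw [hB, show (first :: rest).length = rest.length + 1 from rfl,
          mapTake first rest (PySem.Str.join "."), str_join_singleton]
      simp
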